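-- pv_equiv track=rewrite | github.com/mtndewfan123/ps1-spu-tools | spurm-extractor.py | decPSX
-- ===== SOURCE A (Python) =====
-- K0 = [0,60,115,98,122]
--
-- K1 = [0,0,-52,-55,-60]
--
-- def to16(x):
--     return max(-32768,min(32767,x))
--
-- def decPSX(ind):
--     pcm = []
--     hist1 = 0
--     hist2 = 0
--     lstart = None
--     lend = None
--
--     for i in range(0,len(ind),16):
--         b = ind[i:i+16]
--         # flag bits 7-0 (0000xRSE)
--         # x = ignore bit
--         # R = LOOP REPEAT
--         # S = LOOP START
--         # E = LOOP END
--         if len(b) < 16: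
--             break
--         f = b[1]
--         if (f & 0x06) == 0x06 and lstart is None:
--             lstart = len(pcm)
--
--         h = b[0]
--         shift = h & 0x0F
--         fidx = (h>>4) & 0x07
--         if fidx > 4: fidx = 0
--         k0 = K0[fidx]
--         k1 = K1[fidx]
--
--         for i in b[2:]:
--             for x in (0,4):
--                 nib = (i>>x) & 0x0F
--                 if nib >= 8: nib -= 16
--                 s = (nib<<12)>>shift
--                 s += (hist1*k0+hist2*k1)>>6
--                 s = to16(s)
--                 hist2 = hist1
--                 hist1 = s
--                 pcm.append(s)
--
--         if f & 0x01:
--             lend = len(pcm)-1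
--             break
--     return pcm,lstart,lend
-- ===== SOURCE B (Python) =====
-- K0 = [0,60,115,98,122]
--
-- K1 = [0,0,-52,-55,-60]
--
-- def to16(x):
--     return max(-32768,min(32767,x))
--
-- def decPSX(ind):
--     # pass 1: unpack the 16-byte blocks into a flat list of
--     # (base, k0, k1) items and record the loop-start/loop-end markers
--     items = []
--     lstart = None
--     lend = None
--     n = len(ind)
--     i = 0
--     while i + 16 <= n:
--         h = ind[i]
--         f = ind[i + 1]
--         if lstart is None and (f & 0x06) == 0x06:
--             lstart = len(items)
--         shift = h & 0x0F
--         fidx = (h >> 4) & 0x07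
--         if fidx > 4:
--             fidx = 0
--         k0 = K0[fidx]
--         k1 = K1[fidx]
--         for byte in ind[i + 2:i + 16]:
--             lo = byte & 0x0F
--             hi = (byte >> 4) & 0x0F
--             items.append((((lo - 16 if lo >= 8 else lo) << 12) >> shift, k0, k1))
--             items.append((((hi - 16 if hi >= 8 else hi) << 12) >> shift, k0, k1))
--         if f & 0x01:
--             lend = len(items) - 1
--             break
--         i += 16
--     # pass 2: the saturating IIR recurrence over the flat item list
--     pcm = []
--     hist1 = 0
--     hist2 = 0
--     for base, k0, k1 in items:
--         s = to16(base + ((hist1 * k0 + hist2 * k1) >> 6))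
--         hist2 = hist1
--         hist1 = s
--         pcm.append(s)
--     return pcm, lstart, lend
-- ===== Notes on version B (the rewrite author's own statement) =====
-- stated objective: alternative
-- what changed: A decodes in one fused pass (nested byte/nibble loops computing each sample inline); B is re-decomposed into two passes: pass 1 unpacks the 16-byte blocks into a flat (base,k0,k1) item list while recording the loop-start/loop-end markers, pass 2 is a single fold applying only the saturating IIR recurrence over that flat list.
import Mathlib
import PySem

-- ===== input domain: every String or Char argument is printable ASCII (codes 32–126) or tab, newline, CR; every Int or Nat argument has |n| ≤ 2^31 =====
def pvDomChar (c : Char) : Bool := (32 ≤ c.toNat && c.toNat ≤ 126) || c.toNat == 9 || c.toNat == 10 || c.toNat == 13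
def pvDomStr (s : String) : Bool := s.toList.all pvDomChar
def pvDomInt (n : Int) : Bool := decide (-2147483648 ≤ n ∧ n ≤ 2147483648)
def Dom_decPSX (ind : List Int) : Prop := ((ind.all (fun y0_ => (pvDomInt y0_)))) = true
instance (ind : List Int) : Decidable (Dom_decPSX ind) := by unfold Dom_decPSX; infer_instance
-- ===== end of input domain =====

-- B re-decomposes A's fused decoder into two passes (unpack blocks into a flat
-- (base,k0,k1) item list with the loop markers, then one fold for the saturating
-- recurrence); objective: alternative decomposition, same cost.

-- ===== PORT A =====
def pyK0 : List Int := [0, 60, 115, 98, 122]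
def pyK1 : List Int := [0, 0, -52, -55, -60]
def pyTo16 (x : Int) : Int := max (-32768) (min 32767 x)

-- A's inner `for x in (0,4)` loop over one data byte (state = (pcm, hist1, hist2))
def aInner (shift : Nat) (k0 k1 : Int) (st : List Int × Int × Int) (byt : Int) :
    List Int × Int × Int :=
  [0, 4].foldl (fun st (x : Nat) =>
    let nib := PySem.Int.band (byt >>> x) 15
    let nib := if nib ≥ 8 then nib - 16 else nib
    let s := (nib <<< 12) >>> shift
    let s := s + ((st.2.1 * k0 + st.2.2 * k1) >>> 6)
    let s := pyTo16 s
    (st.1 ++ [s], s, st.2.1)) st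

-- A's `for i in range(0, len(ind), 16)` loop with its two `break`s, as index recursion
def decPSXLoop (ind : List Int) (i : Nat) (pcm : List Int) (hist1 hist2 : Int)
    (lstart lend : Option Int) : List Int × Option Int × Option Int :=
  if _hlt : i < ind.length then
    let b := PySem.List.slice ind (some (i : Int)) (some ((i : Int) + 16))
    if b.length < 16 then (pcm, lstart, lend)
    else
      let f := PySem.List.pyGetD b 1 0          -- b[1]; in range: the guard gives len b = 16
      let lstart := if PySem.Int.band f 6 = 6 ∧ lstart = none
                    then some (PySem.List.len pcm) else lstart
      let h := PySem.List.pyGetD b 0 0          -- b[0]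
      let shift := (PySem.Int.band h 15).toNat  -- 0 ≤ h & 0xF: toNat is exact
      let fidx := PySem.Int.band (h >>> 4) 7
      let fidx := if fidx > 4 then 0 else fidx
      let k0 := PySem.List.pyGetD pyK0 fidx 0   -- K0[fidx]; 0 ≤ fidx ≤ 4: in range
      let k1 := PySem.List.pyGetD pyK1 fidx 0
      let st := (PySem.List.slice b (some 2) none).foldl (aInner shift k0 k1)
                  (pcm, hist1, hist2)
      if PySem.Int.band f 1 ≠ 0 then
        (st.1, lstart, some (PySem.List.len st.1 - 1))
      else
        decPSXLoop ind (i + 16) st.1 st.2.1 st.2.2 lstart lend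
  else (pcm, lstart, lend)
  termination_by ind.length - i
  decreasing_by omega

def decPSX (ind : List Int) : List Int × Option Int × Option Int :=
  decPSXLoop ind 0 [] 0 0 none none

-- ===== PORT B =====
-- pass 1, per data byte: append the two unpacked (base, k0, k1) items
def bUnpackStep (shift : Nat) (k0 k1 : Int) (acc : List (Int × Int × Int)) (byt : Int) :
    List (Int × Int × Int) :=
  let lo := PySem.Int.band byt 15
  let hi := PySem.Int.band (byt >>> (4 : Nat)) 15
  acc ++ [(((if lo ≥ 8 then lo - 16 else lo) <<< 12) >>> shift, k0, k1)]
      ++ [(((if hi ≥ 8 then hi - 16 else hi) <<< 12) >>> shift, k0, k1)]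

-- pass 1: Source B's `while i + 16 <= n` block scan
def decPSXAltPass1 (ind : List Int) (i : Nat) (items : List (Int × Int × Int))
    (lstart lend : Option Int) : List (Int × Int × Int) × Option Int × Option Int :=
  if _hle : i + 16 ≤ ind.length then
    let h := PySem.List.pyGetD ind (i : Int) 0          -- ind[i]; i + 16 ≤ n: in range
    let f := PySem.List.pyGetD ind ((i : Int) + 1) 0    -- ind[i+1]
    let lstart := if lstart = none ∧ PySem.Int.band f 6 = 6
                  then some (PySem.List.len items) else lstart
    let shift := (PySem.Int.band h 15).toNat            -- 0 ≤ h & 0xF: toNat is exact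
    let fidx := PySem.Int.band (h >>> 4) 7
    let fidx := if fidx > 4 then 0 else fidx
    let k0 := PySem.List.pyGetD pyK0 fidx 0             -- K0[fidx]; 0 ≤ fidx ≤ 4: in range
    let k1 := PySem.List.pyGetD pyK1 fidx 0
    let items := (PySem.List.slice ind (some ((i : Int) + 2)) (some ((i : Int) + 16))).foldl
        (bUnpackStep shift k0 k1) items
    if PySem.Int.band f 1 ≠ 0 then (items, lstart, some (PySem.List.len items - 1))
    else decPSXAltPass1 ind (i + 16) items lstart lend
  else (items, lstart, lend)
  termination_by ind.length - i
  decreasing_by omega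

-- pass 2: the saturating recurrence, one fold over the flat item list
def bPass2Step (st : List Int × Int × Int) (it : Int × Int × Int) : List Int × Int × Int :=
  let s := pyTo16 (it.1 + ((st.2.1 * it.2.1 + st.2.2 * it.2.2) >>> 6))
  (st.1 ++ [s], s, st.2.1)

def decPSXAltPass2 (items : List (Int × Int × Int)) (st : List Int × Int × Int) :
    List Int × Int × Int :=
  items.foldl bPass2Step st

def decPSX_alt (ind : List Int) : List Int × Option Int × Option Int :=
  let r := decPSXAltPass1 ind 0 [] none none
  ((decPSXAltPass2 r.1 ([], 0, 0)).1, r.2.1, r.2.2)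

-- ===== PRECONDITION & SPEC =====
def Spec_decPSX (ind : List Int) (out : List Int × Option Int × Option Int) : Prop := out = decPSX_alt ind
instance (ind : List Int) (out : List Int × Option Int × Option Int) : Decidable (Spec_decPSX ind out) := by unfold Spec_decPSX; infer_instance

-- ===== CLAIM (what is proved, stated in full; the proofs are below) =====
def Claim_equal_decPSX : Prop := ∀ (ind : List Int), Dom_decPSX ind → Spec_decPSX ind (decPSX ind)

-- ===== LEMMAS AND PROOFS =====

theorem pass2_append (xs ys : List (Int × Int × Int)) (st : List Int × Int × Int) :
    decPSXAltPass2 (xs ++ ys) st = decPSXAltPass2 ys (decPSXAltPass2 xs st) := by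
  simp [decPSXAltPass2, List.foldl_append]

theorem pass2_len (xs : List (Int × Int × Int)) :
    ∀ st : List Int × Int × Int,
      (decPSXAltPass2 xs st).1.length = st.1.length + xs.length := by
  induction xs with
  | nil => intro st; simp [decPSXAltPass2]
  | cons a xs ih =>
      intro st
      simp [decPSXAltPass2, List.foldl_cons] at *
      rw [ih]
      simp [bPass2Step]
      omega

theorem unpack_factor (shift : Nat) (k0 k1 : Int) (data : List Int) :
    ∀ acc, data.foldl (bUnpackStep shift k0 k1) acc
      = acc ++ data.foldl (bUnpackStep shift k0 k1) [] := by
  induction data with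
  | nil => intro acc; simp
  | cons byt data ih =>
      intro acc
      rw [List.foldl_cons, List.foldl_cons, ih (bUnpackStep shift k0 k1 acc byt),
          ih (bUnpackStep shift k0 k1 [] byt)]
      simp [bUnpackStep]

theorem inner_step_eq (shift : Nat) (k0 k1 : Int) (st : List Int × Int × Int) (byt : Int) :
    aInner shift k0 k1 st byt
      = decPSXAltPass2 (bUnpackStep shift k0 k1 [] byt) st := by
  simp only [aInner, bUnpackStep, decPSXAltPass2, bPass2Step, List.foldl_cons, List.foldl_nil,
    List.nil_append, List.append_assoc, List.singleton_append]
  rw [show byt >>> (0 : Nat) = byt by simp]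

theorem inner_eq (shift : Nat) (k0 k1 : Int) (data : List Int) :
    ∀ st, data.foldl (aInner shift k0 k1) st
      = decPSXAltPass2 (data.foldl (bUnpackStep shift k0 k1) []) st := by
  induction data with
  | nil => intro st; simp [decPSXAltPass2]
  | cons byt data ih =>
      intro st
      rw [List.foldl_cons, List.foldl_cons,
          unpack_factor shift k0 k1 data (bUnpackStep shift k0 k1 [] byt),
          pass2_append, ih, inner_step_eq]

theorem block_fold_eq (sh : Nat) (k0 k1 : Int) (data : List Int)
    (items : List (Int × Int × Int)) :
    data.foldl (aInner sh k0 k1) (decPSXAltPass2 items ([], 0, 0))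
      = decPSXAltPass2 (data.foldl (bUnpackStep sh k0 k1) items) ([], 0, 0) := by
  rw [inner_eq, unpack_factor sh k0 k1 data items, pass2_append]

theorem len_pass2 (u : List (Int × Int × Int)) :
    PySem.List.len (decPSXAltPass2 u ([], 0, 0)).1 = PySem.List.len u := by
  simp [PySem.List.len_eq, pass2_len]

theorem loop_eq (ind : List Int) :
    ∀ (m i : Nat) (items : List (Int × Int × Int)) (lstart lend : Option Int),
      ind.length - i ≤ m →
      decPSXLoop ind i (decPSXAltPass2 items ([], 0, 0)).1
          (decPSXAltPass2 items ([], 0, 0)).2.1 (decPSXAltPass2 items ([], 0, 0)).2.2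
          lstart lend
        = (fun r : List (Int × Int × Int) × Option Int × Option Int =>
            ((decPSXAltPass2 r.1 ([], 0, 0)).1, r.2.1, r.2.2))
            (decPSXAltPass1 ind i items lstart lend) := by
  intro m
  induction m with
  | zero =>
      intro i items lstart lend hm
      rw [decPSXLoop, decPSXAltPass1, dif_neg (by omega : ¬ i < ind.length),
          dif_neg (by omega : ¬ i + 16 ≤ ind.length)]
  | succ m ih =>
      intro i items lstart lend hm
      by_cases hle : i + 16 ≤ ind.length
      · -- one full block is processed on both sides
        have e1 : ((i : Int) + 16) = ((i + 16 : Nat) : Int) := by push_cast; ring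
        have e2 : ((i : Int) + 2) = ((i + 2 : Nat) : Int) := by push_cast; ring
        have hsl : PySem.List.slice ind (some (i : Int)) (some ((i : Int) + 16))
            = (ind.drop i).take 16 := by
          rw [e1, PySem.List.slice_natCast]
          congr 1
          omega
        have hlen : ((ind.drop i).take 16).length = 16 := by
          simp
          omega
        have hb0 : PySem.List.pyGetD ((ind.drop i).take 16) 0 0
            = PySem.List.pyGetD ind (i : Int) 0 := by
          rw [PySem.List.pyGetD_zero, PySem.List.pyGetD_natCast]
          simp [List.getD]
        have hb1 : PySem.List.pyGetD ((ind.drop i).take 16) 1 0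
            = PySem.List.pyGetD ind ((i : Int) + 1) 0 := by
          rw [show ((i : Int) + 1) = ((i + 1 : Nat) : Int) by push_cast; ring,
              PySem.List.pyGetD_natCast, PySem.List.pyGetD_ofNat']
          simp [List.getD, List.getElem?_drop]
        have hsl2 : PySem.List.slice ((ind.drop i).take 16) (some 2) none
            = PySem.List.slice ind (some ((i : Int) + 2)) (some ((i : Int) + 16)) := by
          rw [e1, e2, PySem.List.slice_natCast,
              show ((2 : Int)) = ((2 : Nat) : Int) by norm_num,
              PySem.List.slice_from_natCast]
          rw [List.drop_take, List.drop_drop]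
          congr 1
          omega
        rw [decPSXLoop, decPSXAltPass1, dif_pos (by omega : i < ind.length),
            dif_pos hle]
        simp only [hsl, hlen, hb0, hb1, hsl2]
        rw [if_neg (by omega : ¬ (16 : Nat) < 16)]
        rw [show ((decPSXAltPass2 items ([], 0, 0)).1, (decPSXAltPass2 items ([], 0, 0)).2.1,
              (decPSXAltPass2 items ([], 0, 0)).2.2) = decPSXAltPass2 items ([], 0, 0) from rfl,
            block_fold_eq]
        rw [show (if PySem.Int.band (PySem.List.pyGetD ind ((i : Int) + 1) 0) 6 = 6 ∧ lstart = none
                  then some (PySem.List.len (decPSXAltPass2 items ([], 0, 0)).1) else lstart)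
              = (if lstart = none ∧ PySem.Int.band (PySem.List.pyGetD ind ((i : Int) + 1) 0) 6 = 6
                  then some (PySem.List.len items) else lstart) by
              rw [len_pass2]; exact if_congr and_comm rfl rfl]
        simp only [len_pass2]
        by_cases hbreak : PySem.Int.band (PySem.List.pyGetD ind ((i : Int) + 1) 0) 1 ≠ 0
        · rw [if_pos hbreak, if_pos hbreak]
        · rw [if_neg hbreak, if_neg hbreak]
          exact ih (i + 16) _ _ lend (by omega)
      · rw [decPSXLoop, decPSXAltPass1, dif_neg hle]
        by_cases hlt : i < ind.length
        · rw [dif_pos hlt]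
          have hsl : PySem.List.slice ind (some (i : Int)) (some ((i : Int) + 16))
              = (ind.drop i).take 16 := by
            rw [show ((i : Int) + 16) = ((i + 16 : Nat) : Int) by push_cast; ring,
                PySem.List.slice_natCast]
            congr 1
            omega
          simp only [hsl]
          rw [if_pos (by simp; omega)]
        · rw [dif_neg hlt]

-- ===== VERDICT (by name: the statement is the Claim_ definition above) =====
theorem decPSX_spec : Claim_equal_decPSX := by
  intro ind _
  unfold Spec_decPSX decPSX decPSX_alt
  have h := loop_eq ind ind.length 0 [] none none (by omega)
  simpa [decPSXAltPass2] using h
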